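-- pv_equiv track=rewrite | github.com/JiajunZhai/AdCreative-AI-Script-Generator | backend/main.py | _extract_headline_keywords
-- ===== SOURCE A (Python) =====
-- def _extract_headline_keywords(headlines: list[str]) -> list[str]:
--     if not headlines:
--         return []
--     first = str(headlines[0] or "")
--     # Keep it simple and robust: ASCII-ish tokens only
--     tokens = []
--     for raw in first.replace("#", " ").replace("|", " ").replace("-", " ").split():
--         w = "".join(ch for ch in raw if ch.isalnum())
--         if len(w) >= 3:
--             tokens.append(w.lower())
--     # de-dup while preserving order
--     out: list[str] = []
--     for t in tokens:
--         if t not in out: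
--             out.append(t)
--     return out[:6]
-- ===== SOURCE B (Python) =====
-- def _extract_headline_keywords(headlines: list[str]) -> list[str]:
--     if not headlines:
--         return []
--     first = str(headlines[0] or "")
--     words = [
--         w.lower()
--         for raw in first.replace("#", " ").replace("|", " ").replace("-", " ").split()
--         if len(w := "".join(ch for ch in raw if ch.isalnum())) >= 3
--     ]
--     # selection: fill each of the up-to-6 output slots with the first word not chosen yet
--     out: list[str] = []
--     for _ in range(6):
--         nxt = next((t for t in words if t not in out), None)
--         if nxt is None:
--             break
--         out.append(nxt)
--     return out
-- ===== Notes on version B (the rewrite author's own statement) =====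
-- stated objective: alternative
-- what changed: Tokenization becomes a comprehension and the stateful dedup-then-slice pass is replaced by a selection algorithm: an outer loop over the six output slots that each time rescans the word list for the first word not yet chosen.
import Mathlib
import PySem

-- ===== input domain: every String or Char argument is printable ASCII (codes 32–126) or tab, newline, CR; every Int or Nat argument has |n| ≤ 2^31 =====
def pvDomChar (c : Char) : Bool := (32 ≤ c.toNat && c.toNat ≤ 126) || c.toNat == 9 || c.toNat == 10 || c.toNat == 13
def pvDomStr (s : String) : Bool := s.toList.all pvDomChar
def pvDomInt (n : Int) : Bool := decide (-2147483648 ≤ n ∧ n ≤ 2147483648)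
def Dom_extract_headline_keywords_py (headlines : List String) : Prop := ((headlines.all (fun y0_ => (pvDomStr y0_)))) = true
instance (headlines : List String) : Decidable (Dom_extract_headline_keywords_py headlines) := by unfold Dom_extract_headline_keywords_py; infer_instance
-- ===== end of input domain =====

-- B replaces A's stateful dedup-then-slice pass by a selection algorithm: an outer loop over the
-- six output slots, each time rescanning the word list for the first word not yet chosen.
-- ===== PORT A =====
def extract_headline_keywords_py (headlines : List String) : List String :=
  match headlines with
  | [] => []
  | h0 :: _ =>
    let first := if h0 = "" then "" else h0
    let cleaned := PySem.Str.replace (PySem.Str.replace (PySem.Str.replace first "#" " ") "|" " ") "-" " "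
    let tokens := (PySem.Str.split₀ cleaned).foldl (fun acc raw =>
      let w := String.ofList (raw.toList.filter PySem.Chars.isalnum)
      if 3 ≤ w.toList.length then acc ++ [PySem.Str.lower w] else acc) []
    let out := tokens.foldl (fun out t => if t ∈ out then out else out ++ [t]) []
    PySem.List.slice out none (some 6)

-- ===== PORT B =====
-- Source B's selection loop: 'for _ in range(6)', each round the first word not already chosen
def extract_headline_keywords_alt_sel (fuel : Nat) (words : List String)
    (out : List String) : List String :=
  match fuel with
  | 0 => out
  | fuel + 1 =>
    match words.find? (fun t => !decide (t ∈ out)) with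
    | none => out
    | some t => extract_headline_keywords_alt_sel fuel words (out ++ [t])

def extract_headline_keywords_py_alt (headlines : List String) : List String :=
  match headlines with
  | [] => []
  | h0 :: _ =>
    let first := if h0 = "" then "" else h0
    let cleaned := PySem.Str.replace (PySem.Str.replace (PySem.Str.replace first "#" " ") "|" " ") "-" " "
    -- the comprehension: keep lowercased w whenever the alnum-filtered raw has length ≥ 3
    let words := (PySem.Str.split₀ cleaned).filterMap (fun raw =>
      let w := String.ofList (raw.toList.filter PySem.Chars.isalnum)
      if 3 ≤ w.toList.length then some (PySem.Str.lower w) else none)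
    extract_headline_keywords_alt_sel 6 words []

-- ===== PRECONDITION & SPEC =====
def Spec_extract_headline_keywords_py (headlines : List String) (out : List String) : Prop := out = extract_headline_keywords_py_alt headlines
instance (headlines : List String) (out : List String) : Decidable (Spec_extract_headline_keywords_py headlines out) := by unfold Spec_extract_headline_keywords_py; infer_instance

-- ===== CLAIM (what is proved, stated in full; the proofs are below) =====
def Claim_equal_extract_headline_keywords_py : Prop := ∀ (headlines : List String), Dom_extract_headline_keywords_py headlines → Spec_extract_headline_keywords_py headlines (extract_headline_keywords_py headlines)

-- ===== LEMMAS AND PROOFS =====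

-- A's token-building loop is a filterMap
lemma tokens_eq_filterMap (raws : List String) : ∀ acc : List String,
    raws.foldl (fun acc raw =>
      let w := String.ofList (raw.toList.filter PySem.Chars.isalnum)
      if 3 ≤ w.toList.length then acc ++ [PySem.Str.lower w] else acc) acc =
    acc ++ raws.filterMap (fun raw =>
      let w := String.ofList (raw.toList.filter PySem.Chars.isalnum)
      if 3 ≤ w.toList.length then some (PySem.Str.lower w) else none) := by
  induction raws with
  | nil => intro acc; simp
  | cons raw rest ih =>
    intro acc
    simp only [List.foldl_cons, List.filterMap_cons]
    by_cases c : 3 ≤ (String.ofList (raw.toList.filter PySem.Chars.isalnum)).toList.length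
    · simp only [c, if_true, ih]; simp
    · simp only [c, if_false, ih]

-- A's membership-dedup loop is exactly folding PySem.Set.add
lemma dedup_eq_add (tokens : List String) : ∀ s : List String,
    tokens.foldl (fun out t => if t ∈ out then out else out ++ [t]) s =
    tokens.foldl PySem.Set.add s := by
  induction tokens with
  | nil => intro s; rfl
  | cons t rest ih =>
    intro s
    simp only [List.foldl_cons]
    have : (if t ∈ s then s else s ++ [t]) = PySem.Set.add s t := by
      unfold PySem.Set.add
      by_cases h : t ∈ s <;> simp [h]
    rw [this, ih]

-- the accumulator is always a prefix of the finished add-fold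
lemma add_fold_prefix (words : List String) : ∀ s : List String,
    s <+: words.foldl PySem.Set.add s := by
  induction words with
  | nil => intro s; simp
  | cons w rest ih =>
    intro s
    refine List.IsPrefix.trans ?_ (ih (PySem.Set.add s w))
    unfold PySem.Set.add
    split <;> simp

-- the first word not in `out` is the element of the add-fold right after the prefix `out`
lemma find_new_eq_drop_head (words : List String) : ∀ out : List String,
    words.find? (fun t => !decide (t ∈ out)) =
    ((words.foldl PySem.Set.add out).drop out.length).head? := by
  induction words with
  | nil => intro out; simp [List.drop_length]
  | cons w rest ih =>
    intro out
    simp only [List.foldl_cons, List.find?_cons]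
    by_cases h : w ∈ out
    · have hadd : PySem.Set.add out w = out := by
        unfold PySem.Set.add; simp [h]
      simp [h, ih out]
    · have hadd : PySem.Set.add out w = out ++ [w] := by
        unfold PySem.Set.add; simp [h]
      obtain ⟨tail, htail⟩ := add_fold_prefix rest (out ++ [w])
      simp only [h, decide_false, Bool.not_false, hadd, ← htail]
      rw [List.append_assoc, List.drop_left]
      simp

-- seeding the fold with an already-found-first-new word changes nothing
lemma add_fold_seed (words : List String) : ∀ (out : List String) (t : String),
    words.find? (fun x => !decide (x ∈ out)) = some t →
    words.foldl PySem.Set.add (out ++ [t]) = words.foldl PySem.Set.add out := by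
  induction words with
  | nil => intro out t h; simp at h
  | cons w rest ih =>
    intro out t h
    simp only [List.find?_cons] at h
    by_cases hm : w ∈ out
    · have h1 : PySem.Set.add out w = out := by unfold PySem.Set.add; simp [hm]
      have h2 : PySem.Set.add (out ++ [t]) w = out ++ [t] := by
        unfold PySem.Set.add; simp [hm]
      simp only [hm, decide_true, Bool.not_true] at h
      simp only [List.foldl_cons, h1, h2]
      exact ih out t h
    · simp only [hm, decide_false, Bool.not_false] at h
      have hwt : w = t := by simpa using h
      subst hwt
      have h1 : PySem.Set.add out w = out ++ [w] := by unfold PySem.Set.add; simp [hm]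
      have h2 : PySem.Set.add (out ++ [w]) w = out ++ [w] := by
        unfold PySem.Set.add; simp
      simp [List.foldl_cons, h1]

-- the selection loop computes a take of the add-fold
lemma sel_eq_take (fuel : Nat) : ∀ (words out : List String),
    extract_headline_keywords_alt_sel fuel words out =
    (words.foldl PySem.Set.add out).take (out.length + fuel) := by
  induction fuel with
  | zero =>
    intro words out
    obtain ⟨tail, htail⟩ := add_fold_prefix words out
    rw [extract_headline_keywords_alt_sel, ← htail]
    simp
  | succ n ih =>
    intro words out
    rw [extract_headline_keywords_alt_sel]
    rcases hf : words.find? (fun t => !decide (t ∈ out)) with _ | t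
    · show out = _
      have hd : ((words.foldl PySem.Set.add out).drop out.length).head? = none := by
        rw [← find_new_eq_drop_head]; exact hf
      have hnil := List.head?_eq_none_iff.mp hd
      have hlen : (words.foldl PySem.Set.add out).length ≤ out.length :=
        List.drop_eq_nil_iff.mp hnil
      have heq : out = words.foldl PySem.Set.add out :=
        (add_fold_prefix words out).eq_of_length_le hlen
      rw [← heq, List.take_of_length_le (Nat.le_add_right _ _)]
    · show extract_headline_keywords_alt_sel n words (out ++ [t]) = _
      rw [ih words (out ++ [t]), add_fold_seed words out t hf]
      congr 1
      simp
      omega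

-- ===== VERDICT (by name: the statement is the Claim_ definition above) =====
theorem extract_headline_keywords_py_spec : Claim_equal_extract_headline_keywords_py := by
  intro headlines _
  unfold Spec_extract_headline_keywords_py extract_headline_keywords_py extract_headline_keywords_py_alt
  match headlines with
  | [] => rfl
  | h0 :: _ =>
    simp only
    rw [PySem.List.slice_to, dedup_eq_add, tokens_eq_filterMap, List.nil_append,
      sel_eq_take 6 _ []]
    · congr 1
    · decide
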